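-- pv_equiv track=rewrite | github.com/vgamula/advent-of-code | 2023/13/main.py | find_mirror_line_from_prepared_num_masks
-- ===== SOURCE A (Python) =====
-- def find_mirror_line_from_prepared_num_masks(nums, direction):
--     candidates = []
--     for i in range(len(nums) - 1):
--         if nums[i] != nums[i + 1]:
--             continue
--         left, right = i, i + 1
--         while 0 <= left and right < len(nums) and nums[left] == nums[right]:
--             left -= 1
--             right += 1
--         left += 1
--         right -= 1
--         if left == 0 or right == len(nums) - 1:
--             # only considering reflection when it reaches the end of pattern
--             candidates.append((right - left + 1, direction, left, right, i))
--     return candidates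
-- ===== SOURCE B (Python) =====
-- def find_mirror_line_from_prepared_num_masks(nums, direction):
--     # For each candidate mirror line between i and i+1, the reflection reaches a
--     # boundary iff the full block of width m = min(i+1, n-1-i) on the left equals
--     # the reversed block on the right; check that with one slice comparison.
--     n = len(nums)
--     out = []
--     for i in range(n - 1):
--         m = min(i + 1, n - 1 - i)
--         if nums[i + 1 - m:i + 1] == nums[i + 1:i + 1 + m][::-1]:
--             out.append((2 * m, direction, i + 1 - m, i + m, i))
--     return out
-- ===== Notes on version B (the rewrite author's own statement) =====
-- stated objective: simpler
-- what changed: A expands each candidate center outward with a two-pointer while-loop to find the maximal reflection and then tests whether it reached a boundary; B instead computes the boundary-limited width m = min(i+1, n-1-i) directly and performs a single slice vs reversed-slice comparison per center, with no expansion loop or left/right state.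
import Mathlib
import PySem

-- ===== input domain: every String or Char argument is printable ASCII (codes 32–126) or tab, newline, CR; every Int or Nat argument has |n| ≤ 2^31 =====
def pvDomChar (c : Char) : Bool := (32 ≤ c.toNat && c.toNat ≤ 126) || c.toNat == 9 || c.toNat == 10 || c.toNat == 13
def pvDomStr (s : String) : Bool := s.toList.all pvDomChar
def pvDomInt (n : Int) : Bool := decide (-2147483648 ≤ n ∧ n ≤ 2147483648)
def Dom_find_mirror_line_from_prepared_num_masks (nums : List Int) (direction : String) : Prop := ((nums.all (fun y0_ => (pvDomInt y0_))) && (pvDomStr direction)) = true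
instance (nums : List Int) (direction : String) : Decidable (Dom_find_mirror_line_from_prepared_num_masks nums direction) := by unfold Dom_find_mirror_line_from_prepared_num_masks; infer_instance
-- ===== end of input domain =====

-- B replaces A's maximal two-pointer expansion per center by one fixed-width
-- slice/reversed-slice comparison per center (objective: alternative/simpler).

-- ===== PORT A =====
-- the while-loop 'while 0 <= left and right < len(nums) and nums[left] == nums[right]: left -= 1; right += 1'
def pvExpand (nums : List Int) (l r : Int) : Int × Int :=
  if h : 0 ≤ l ∧ r < (nums.length : Int) ∧ PySem.List.pyGet? nums l = PySem.List.pyGet? nums r then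
    pvExpand nums (l - 1) (r + 1)
  else (l, r)
termination_by ((nums.length : Int) - r).toNat
decreasing_by omega

def find_mirror_line_from_prepared_num_masks (nums : List Int) (direction : String) : List (Int × String × Int × Int × Int) :=
  (PySem.List.pyRange 0 ((nums.length : Int) - 1) 1).foldl (fun candidates i =>
    if PySem.List.pyGet? nums i ≠ PySem.List.pyGet? nums (i + 1) then candidates
    else
      let lr := pvExpand nums i (i + 1)
      let left := lr.1 + 1
      let right := lr.2 - 1
      if left = 0 ∨ right = (nums.length : Int) - 1 then
        candidates ++ [(right - left + 1, direction, left, right, i)]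
      else candidates) []

-- ===== PORT B =====
def find_mirror_line_from_prepared_num_masks_alt (nums : List Int) (direction : String) : List (Int × String × Int × Int × Int) :=
  (PySem.List.pyRange 0 ((nums.length : Int) - 1) 1).foldl (fun out i =>
    let m := min (i + 1) ((nums.length : Int) - 1 - i)
    if PySem.List.slice nums (some (i + 1 - m)) (some (i + 1)) =
       (PySem.List.slice nums (some (i + 1)) (some (i + 1 + m))).reverse then
      out ++ [(2 * m, direction, i + 1 - m, i + m, i)]
    else out) []

-- ===== PRECONDITION & SPEC =====
def Spec_find_mirror_line_from_prepared_num_masks (nums : List Int) (direction : String) (out : List (Int × String × Int × Int × Int)) : Prop := out = find_mirror_line_from_prepared_num_masks_alt nums direction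
instance (nums : List Int) (direction : String) (out : List (Int × String × Int × Int × Int)) : Decidable (Spec_find_mirror_line_from_prepared_num_masks nums direction out) := by unfold Spec_find_mirror_line_from_prepared_num_masks; infer_instance

-- ===== CLAIM (what is proved, stated in full; the proofs are below) =====
def Claim_equal_find_mirror_line_from_prepared_num_masks : Prop := ∀ (nums : List Int) (direction : String), Dom_find_mirror_line_from_prepared_num_masks nums direction → Spec_find_mirror_line_from_prepared_num_masks nums direction (find_mirror_line_from_prepared_num_masks nums direction)

-- ===== LEMMAS AND PROOFS =====

-- the number of iterations of A's while loop, same recursion as pvExpand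
def pvRun (nums : List Int) (l r : Int) : Nat :=
  if h : 0 ≤ l ∧ r < (nums.length : Int) ∧ PySem.List.pyGet? nums l = PySem.List.pyGet? nums r then
    pvRun nums (l - 1) (r + 1) + 1
  else 0
termination_by ((nums.length : Int) - r).toNat
decreasing_by omega

lemma pvExpand_eq_run (nums : List Int) (l r : Int) :
    pvExpand nums l r = (l - pvRun nums l r, r + pvRun nums l r) := by
  fun_induction pvRun nums l r with
  | case1 l r h ih =>
      rw [pvExpand, dif_pos h, ih]
      simp only [Prod.mk.injEq]
      constructor <;> (push_cast; ring)
  | case2 l r h =>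
      rw [pvExpand, dif_neg h]; simp

lemma pvRun_good (nums : List Int) (l r : Int) :
    ∀ j : Nat, j < pvRun nums l r →
      0 ≤ l - j ∧ r + j < (nums.length : Int) ∧
      PySem.List.pyGet? nums (l - j) = PySem.List.pyGet? nums (r + j) := by
  fun_induction pvRun nums l r with
  | case1 l r h ih =>
      intro j hj
      match j with
      | 0 => simpa using h
      | Nat.succ j =>
          have hx := ih j (by omega)
          refine ⟨by push_cast; omega, by push_cast; omega, ?_⟩
          have e1 : l - ((j : Int) + 1) = l - 1 - j := by ring
          have e2 : r + ((j : Int) + 1) = r + 1 + j := by ring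
          push_cast
          rw [e1, e2]; exact hx.2.2
  | case2 l r h => intro j hj; omega

lemma pvRun_stop (nums : List Int) (l r : Int) :
    ¬ (0 ≤ l - (pvRun nums l r : Int) ∧ r + (pvRun nums l r : Int) < (nums.length : Int) ∧
       PySem.List.pyGet? nums (l - (pvRun nums l r : Int)) = PySem.List.pyGet? nums (r + (pvRun nums l r : Int))) := by
  fun_induction pvRun nums l r with
  | case1 l r h ih =>
      intro hc
      apply ih
      push_cast at hc ⊢
      have e1 : l - 1 - (pvRun nums (l - 1) (r + 1) : Int) = l - ((pvRun nums (l - 1) (r + 1) : Int) + 1) := by ring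
      have e2 : r + 1 + (pvRun nums (l - 1) (r + 1) : Int) = r + ((pvRun nums (l - 1) (r + 1) : Int) + 1) := by ring
      rw [e1, e2]
      exact hc
  | case2 l r h => simpa using h

-- slice/reverse equality ↔ pointwise reflection, Nat-indexed form
lemma reflect_nat (nums : List Int) (iN mN : Nat)
    (h1 : 1 ≤ mN) (h2 : mN ≤ iN + 1) (h3 : iN + 1 + mN ≤ nums.length) :
    ((nums.drop (iN + 1 - mN)).take mN = ((nums.drop (iN + 1)).take mN).reverse) ↔
    (∀ j < mN, nums[iN - j]? = nums[iN + 1 + j]?) := by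
  have hgetL : ∀ t, t < mN → ((nums.drop (iN + 1 - mN)).take mN)[t]? = nums[iN + 1 - mN + t]? := by
    intro t ht
    rw [List.getElem?_take_of_lt ht, List.getElem?_drop]
  have hlenR : ((nums.drop (iN + 1)).take mN).length = mN := by
    simp; omega
  have hgetR : ∀ t, t < mN → (((nums.drop (iN + 1)).take mN).reverse)[t]? = nums[iN + 1 + (mN - 1 - t)]? := by
    intro t ht
    rw [List.getElem?_reverse (by omega), hlenR]
    rw [List.getElem?_take_of_lt (by omega), List.getElem?_drop]
  constructor
  · intro h j hj
    have := congrArg (fun xs => xs[mN - 1 - j]?) h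
    simp only at this
    rw [hgetL _ (by omega), hgetR _ (by omega)] at this
    have e1 : iN + 1 - mN + (mN - 1 - j) = iN - j := by omega
    have e2 : mN - 1 - (mN - 1 - j) = j := by omega
    rw [e1, e2] at this
    exact this
  · intro h
    apply List.ext_getElem?
    intro t
    by_cases ht : t < mN
    · rw [hgetL _ ht, hgetR _ ht]
      have e1 : iN + 1 - mN + t = iN - (mN - 1 - t) := by omega
      rw [e1]
      exact h _ (by omega)
    · rw [List.getElem?_eq_none (by simp; omega), List.getElem?_eq_none (by simp [hlenR]; omega)]

-- Int-indexed bridge for the exact window B compares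
lemma slice_reflect_iff (nums : List Int) (i m : Int)
    (h0 : 0 ≤ i) (hm1 : 1 ≤ m) (hml : m ≤ i + 1) (hmr : m ≤ (nums.length : Int) - 1 - i) :
    (PySem.List.slice nums (some (i + 1 - m)) (some (i + 1)) =
      (PySem.List.slice nums (some (i + 1)) (some (i + 1 + m))).reverse) ↔
    (∀ j : Nat, (j : Int) < m →
      PySem.List.pyGet? nums (i - j) = PySem.List.pyGet? nums (i + 1 + j)) := by
  rw [PySem.List.slice_toNat nums (by omega) (by omega),
      PySem.List.slice_toNat nums (by omega) (by omega)]
  have ha : (i + 1 - m).toNat = i.toNat + 1 - m.toNat := by omega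
  have hb : (i + 1).toNat = i.toNat + 1 := by omega
  have hc : (i + 1).toNat - (i + 1 - m).toNat = m.toNat := by omega
  have hd : (i + 1 + m).toNat - (i + 1).toNat = m.toNat := by omega
  rw [hc, hd, ha, hb]
  rw [reflect_nat nums i.toNat m.toNat (by omega) (by omega) (by omega)]
  constructor
  · intro h j hj
    have e1 : i - (j : Int) = ((i.toNat - j : Nat) : Int) := by omega
    have e2 : i + 1 + (j : Int) = ((i.toNat + 1 + j : Nat) : Int) := by omega
    rw [e1, e2, PySem.List.pyGet?_natCast, PySem.List.pyGet?_natCast]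
    exact h j (by omega)
  · intro h j hj
    have hx := h j (by omega)
    have e1 : i - (j : Int) = ((i.toNat - j : Nat) : Int) := by omega
    have e2 : i + 1 + (j : Int) = ((i.toNat + 1 + j : Nat) : Int) := by omega
    rw [e1, e2, PySem.List.pyGet?_natCast, PySem.List.pyGet?_natCast] at hx
    exact hx

-- per-center equality of the two fold bodies
lemma body_eq (nums : List Int) (direction : String) (i : Int)
    (h0 : 0 ≤ i) (h1 : i < (nums.length : Int) - 1)
    (acc : List (Int × String × Int × Int × Int)) :
    (if PySem.List.pyGet? nums i ≠ PySem.List.pyGet? nums (i + 1) then acc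
     else
       let lr := pvExpand nums i (i + 1)
       let left := lr.1 + 1
       let right := lr.2 - 1
       if left = 0 ∨ right = (nums.length : Int) - 1 then
         acc ++ [(right - left + 1, direction, left, right, i)]
       else acc) =
    (let m := min (i + 1) ((nums.length : Int) - 1 - i)
     if PySem.List.slice nums (some (i + 1 - m)) (some (i + 1)) =
        (PySem.List.slice nums (some (i + 1)) (some (i + 1 + m))).reverse then
       acc ++ [(2 * m, direction, i + 1 - m, i + m, i)]
     else acc) := by
  simp only [pvExpand_eq_run]
  set n : Int := (nums.length : Int) with hn
  set m : Int := min (i + 1) (n - 1 - i) with hm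
  set k : Nat := pvRun nums i (i + 1) with hk
  have hm1 : 1 ≤ m := by omega
  have hml : m ≤ i + 1 := by omega
  have hmr : m ≤ n - 1 - i := by omega
  have hk_le : (k : Int) ≤ m := by
    by_contra hlt
    have hgood := pvRun_good nums i (i + 1) m.toNat (by omega)
    rcases min_cases (i + 1) (n - 1 - i) with ⟨he, _⟩ | ⟨he, _⟩ <;> rw [← hm] at he <;> omega
  have hGood_iff : (∀ j : Nat, (j : Int) < m →
      PySem.List.pyGet? nums (i - j) = PySem.List.pyGet? nums (i + 1 + j)) ↔ (k : Int) = m := by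
    constructor
    · intro hg
      by_contra hne
      have hkm : (k : Int) < m := by omega
      exact pvRun_stop nums i (i + 1)
        ⟨by omega, by omega, by
          have := hg k (by omega)
          have e : i + 1 + (k : Int) = i + 1 + (k : Nat) := by push_cast; ring
          exact this⟩
    · intro hkm j hj
      exact (pvRun_good nums i (i + 1) j (by omega)).2.2
  have hiff := slice_reflect_iff nums i m h0 hm1 hml hmr
  by_cases hfirst : PySem.List.pyGet? nums i = PySem.List.pyGet? nums (i + 1)
  · simp only [hfirst, ne_eq, not_true_eq_false, if_false]
    have hbound : ((i - (k : Int) + 1 = 0) ∨ (i + 1 + (k : Int) - 1 = n - 1)) ↔ (k : Int) = m := by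
      constructor
      · rintro (hc | hc)
        · have : (k : Int) = i + 1 := by omega
          omega
        · have : (k : Int) = n - 1 - i := by omega
          omega
      · intro hc
        rcases min_cases (i + 1) (n - 1 - i) with ⟨he, _⟩ | ⟨he, _⟩ <;> rw [← hm] at he <;> omega
    by_cases hG : ∀ j : Nat, (j : Int) < m →
        PySem.List.pyGet? nums (i - j) = PySem.List.pyGet? nums (i + 1 + j)
    · have hkm : (k : Int) = m := hGood_iff.1 hG
      rw [if_pos (hiff.2 hG), if_pos (hbound.2 hkm)]
      simp only [hkm]
      have e1 : i + 1 + m - 1 - (i - m + 1) + 1 = 2 * m := by ring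
      have e2 : i - m + 1 = i + 1 - m := by ring
      have e3 : i + 1 + m - 1 = i + m := by ring
      rw [e1, e2, e3]
    · have hkm : (k : Int) ≠ m := fun hx => hG (hGood_iff.2 hx)
      rw [if_neg (fun hs => hG (hiff.1 hs)), if_neg (fun hc => hkm (hbound.1 hc))]
  · simp only [ne_eq, hfirst, not_false_eq_true, if_true]
    have : ¬ (∀ j : Nat, (j : Int) < m →
        PySem.List.pyGet? nums (i - j) = PySem.List.pyGet? nums (i + 1 + j)) := by
      intro hg
      exact hfirst (by simpa using hg 0 (by omega))
    rw [if_neg (fun hs => this (hiff.1 hs))]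

-- ===== VERDICT (by name: the statement is the Claim_ definition above) =====
theorem find_mirror_line_from_prepared_num_masks_spec : Claim_equal_find_mirror_line_from_prepared_num_masks := by
  intro nums direction _
  unfold Spec_find_mirror_line_from_prepared_num_masks
  unfold find_mirror_line_from_prepared_num_masks find_mirror_line_from_prepared_num_masks_alt
  refine PySem.List.foldl_congr_mem _ _ _ _ ?_
  intro acc i hi
  have hmem := (PySem.List.mem_pyRange_one).1 hi
  exact body_eq nums direction i hmem.1 (by have := hmem.2; omega) acc
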